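-- pv_equiv track=rewrite | github.com/Tomoka64/interview_preparation | array_interview_questions/array_pair_sum/pair_sum.py | my_pair_sum
-- ===== SOURCE A (Python) =====
-- def my_pair_sum(list, target):
--     if len(list) < 2:
--         return
--     ret = set()
--     for i in range(len(list)):
--         j = i + 1
--         while j < len(list):
--             if (list[i]+ list[j] == target):
--                 if not (list[i], list[j]) in ret:
--                     ret.add( ( min(list[i], list[j]), max(list[i], list[j]) ) )
--             j += 1
--     return len(ret)
-- ===== SOURCE B (Python) =====
-- def my_pair_sum(list, target):
--     if len(list) < 2:
--         return
--     seen = set()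
--     pairs = set()
--     for x in list:
--         y = target - x
--         if y in seen:
--             pairs.add((min(x, y), max(x, y)))
--         seen.add(x)
--     return len(pairs)
-- ===== Notes on version B (the rewrite author's own statement) =====
-- stated objective: faster
-- what changed: Replaced the O(n^2) double index loop over all pairs by a single pass that keeps a hash set of numbers seen so far and records the normalized (min,max) pair whenever the complement of the current element has already been seen.
import Mathlib
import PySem

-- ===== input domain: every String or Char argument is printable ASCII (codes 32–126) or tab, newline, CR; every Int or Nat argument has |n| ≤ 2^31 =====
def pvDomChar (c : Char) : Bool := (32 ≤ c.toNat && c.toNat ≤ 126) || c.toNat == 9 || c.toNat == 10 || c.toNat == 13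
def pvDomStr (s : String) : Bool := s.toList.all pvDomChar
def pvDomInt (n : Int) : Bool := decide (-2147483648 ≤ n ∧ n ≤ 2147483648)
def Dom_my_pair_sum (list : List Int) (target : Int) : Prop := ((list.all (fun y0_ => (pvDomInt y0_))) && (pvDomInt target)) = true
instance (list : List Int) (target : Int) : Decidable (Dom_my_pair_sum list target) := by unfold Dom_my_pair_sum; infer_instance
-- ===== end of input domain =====

-- B replaces A's O(n^2) double index loop by a single pass with a set of seen numbers
-- and a set of normalized (min,max) pairs; same count returned (objective: faster).


-- ===== PORT A =====
-- normalized pair (min, max): Python's ( min(a,b), max(a,b) )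
def pvSpair (a b : Int) : Int × Int := (min a b, max a b)

-- inner 'while j < len(list)' loop of A
def pvAInner (l : List Int) (t : Int) (i : Nat) (ret : PySem.Set (Int × Int)) (j : Nat) :
    PySem.Set (Int × Int) :=
  if j < l.length then
    let a := PySem.List.pyGetD l (i : Int) 0
    let b := PySem.List.pyGetD l (j : Int) 0
    let ret' :=
      if a + b = t then (if (a, b) ∈ ret then ret else PySem.Set.add ret (pvSpair a b)) else ret
    pvAInner l t i ret' (j + 1)
  else ret
termination_by l.length - j

def my_pair_sum (list : List Int) (target : Int) : Option Int :=
  if list.length < 2 then none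
  else
    let ret := (PySem.List.pyRange 0 (list.length : Int) 1).foldl
      (fun ret i => pvAInner list target i.toNat ret (i.toNat + 1)) PySem.Set.empty
    some (ret.length : Int)

-- ===== PORT B =====
def pvBStep (t : Int) (st : PySem.Set Int × PySem.Set (Int × Int)) (x : Int) :
    PySem.Set Int × PySem.Set (Int × Int) :=
  let y := t - x
  let pairs := if y ∈ st.1 then PySem.Set.add st.2 (pvSpair x y) else st.2
  (PySem.Set.add st.1 x, pairs)

def my_pair_sum_alt (list : List Int) (target : Int) : Option Int :=
  if list.length < 2 then none
  else
    let st := list.foldl (pvBStep target) (PySem.Set.empty, PySem.Set.empty)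
    some (st.2.length : Int)

-- ===== PRECONDITION & SPEC =====
def Spec_my_pair_sum (list : List Int) (target : Int) (out : Option Int) : Prop := out = my_pair_sum_alt list target
instance (list : List Int) (target : Int) (out : Option Int) : Decidable (Spec_my_pair_sum list target out) := by unfold Spec_my_pair_sum; infer_instance

-- ===== CLAIM (what is proved, stated in full; the proofs are below) =====
def Claim_equal_my_pair_sum : Prop := ∀ (list : List Int) (target : Int), Dom_my_pair_sum list target → Spec_my_pair_sum list target (my_pair_sum list target)

-- ===== LEMMAS AND PROOFS =====
-- helper predicate: the pairs A collects
def pvAProp (l : List Int) (t : Int) (p : Int × Int) : Prop :=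
  ∃ i k : Nat, i < k ∧ k < l.length ∧ l.getD i 0 + l.getD k 0 = t ∧
    p = pvSpair (l.getD i 0) (l.getD k 0)

lemma pvSpair_le (a b : Int) : (pvSpair a b).1 ≤ (pvSpair a b).2 := by
  simp [pvSpair]

lemma pvSpair_comm (a b : Int) : pvSpair a b = pvSpair b a := by
  simp [pvSpair, min_comm, max_comm]

lemma inner_char (l : List Int) (t : Int) (i : Nat) :
    ∀ d j (ret : PySem.Set (Int × Int)), l.length - j ≤ d →
      (∀ p ∈ ret, p.1 ≤ p.2) → ret.Nodup →
      ((∀ p ∈ pvAInner l t i ret j, p.1 ≤ p.2) ∧ (pvAInner l t i ret j).Nodup ∧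
       ∀ p, p ∈ pvAInner l t i ret j ↔ p ∈ ret ∨ ∃ k, j ≤ k ∧ k < l.length ∧
         l.getD i 0 + l.getD k 0 = t ∧ p = pvSpair (l.getD i 0) (l.getD k 0)) := by
  intro d
  induction d with
  | zero =>
    intro j ret hd hs hn
    have hj : ¬ j < l.length := by omega
    rw [pvAInner]; simp only [hj, if_false]
    refine ⟨hs, hn, fun p => ⟨Or.inl, ?_⟩⟩
    rintro (h | ⟨k, hk1, hk2, _⟩)
    · exact h
    · omega
  | succ d ih =>
    intro j ret hd hs hn
    by_cases hj : j < l.length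
    · rw [pvAInner]; simp only [hj, if_true, PySem.List.pyGetD_natCast]
      set a := l.getD i 0 with ha
      set b := l.getD j 0 with hb
      set ret' := if a + b = t then (if (a, b) ∈ ret then ret else PySem.Set.add ret (pvSpair a b)) else ret with hret'
      have hmem' : ∀ p, p ∈ ret' ↔ p ∈ ret ∨ (a + b = t ∧ p = pvSpair a b) := by
        intro p
        rw [hret']
        split_ifs with h1 h2
        · constructor
          · exact fun h => Or.inl h
          · rintro (h | ⟨_, rfl⟩)
            · exact h
            · have hab : a ≤ b := hs (a, b) h2
              have : pvSpair a b = (a, b) := by simp [pvSpair, min_eq_left hab, max_eq_right hab]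
              rw [this]; exact h2
        · rw [PySem.Set.mem_add]; tauto
        · tauto
      have hs' : ∀ p ∈ ret', p.1 ≤ p.2 := by
        intro p hp
        rcases (hmem' p).1 hp with h | ⟨_, rfl⟩
        · exact hs p h
        · exact pvSpair_le a b
      have hn' : ret'.Nodup := by
        rw [hret']; split_ifs
        · exact hn
        · exact PySem.Set.nodup_add _ _ hn
        · exact hn
      obtain ⟨rs, rn, rm⟩ := ih (j+1) ret' (by omega) hs' hn'
      refine ⟨rs, rn, fun p => ?_⟩
      rw [rm p]
      constructor
      · rintro (h | ⟨k, hk1, hk2, hk3, hk4⟩)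
        · rcases (hmem' p).1 h with h' | ⟨h1, rfl⟩
          · exact Or.inl h'
          · exact Or.inr ⟨j, le_refl j, hj, h1, rfl⟩
        · exact Or.inr ⟨k, by omega, hk2, hk3, hk4⟩
      · rintro (h | ⟨k, hk1, hk2, hk3, hk4⟩)
        · exact Or.inl ((hmem' p).2 (Or.inl h))
        · by_cases hkj : k = j
          · subst hkj
            exact Or.inl ((hmem' p).2 (Or.inr ⟨hk3, hk4⟩))
          · exact Or.inr ⟨k, by omega, hk2, hk3, hk4⟩
    · rw [pvAInner]; simp only [hj, if_false]
      refine ⟨hs, hn, fun p => ⟨Or.inl, ?_⟩⟩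
      rintro (h | ⟨k, hk1, hk2, _⟩)
      · exact h
      · omega

lemma outer_char (l : List Int) (t : Int) :
    ∀ (idxs : List Nat) (ret : PySem.Set (Int × Int)),
      (∀ p ∈ ret, p.1 ≤ p.2) → ret.Nodup →
      ((∀ p ∈ idxs.foldl (fun r i => pvAInner l t i r (i+1)) ret, p.1 ≤ p.2) ∧
       (idxs.foldl (fun r i => pvAInner l t i r (i+1)) ret).Nodup ∧
       ∀ p, p ∈ idxs.foldl (fun r i => pvAInner l t i r (i+1)) ret ↔ p ∈ ret ∨
         ∃ i ∈ idxs, ∃ k, i < k ∧ k < l.length ∧ l.getD i 0 + l.getD k 0 = t ∧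
           p = pvSpair (l.getD i 0) (l.getD k 0)) := by
  intro idxs
  induction idxs with
  | nil => intro ret hs hn; exact ⟨hs, hn, fun p => by simp⟩
  | cons i idxs ih =>
    intro ret hs hn
    obtain ⟨hs1, hn1, hm1⟩ := inner_char l t i l.length (i+1) ret (by omega) hs hn
    obtain ⟨hs2, hn2, hm2⟩ := ih (pvAInner l t i ret (i+1)) hs1 hn1
    refine ⟨hs2, hn2, fun p => ?_⟩
    simp only [List.foldl_cons]
    rw [hm2 p]
    constructor
    · rintro (h | ⟨i', hi', k, hk1, hk2, hk3, hk4⟩)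
      · rcases (hm1 p).1 h with h' | ⟨k, hk1, hk2, hk3, hk4⟩
        · exact Or.inl h'
        · exact Or.inr ⟨i, List.mem_cons_self, k, by omega, hk2, hk3, hk4⟩
      · exact Or.inr ⟨i', List.mem_cons_of_mem _ hi', k, hk1, hk2, hk3, hk4⟩
    · rintro (h | ⟨i', hi', k, hk1, hk2, hk3, hk4⟩)
      · exact Or.inl ((hm1 p).2 (Or.inl h))
      · rcases List.mem_cons.1 hi' with rfl | hi''
        · exact Or.inl ((hm1 p).2 (Or.inr ⟨k, by omega, hk2, hk3, hk4⟩))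
        · exact Or.inr ⟨i', hi'', k, hk1, hk2, hk3, hk4⟩

lemma a_set_char (l : List Int) (t : Int) :
    ((∀ p ∈ (PySem.List.pyRange 0 (l.length : Int) 1).foldl
        (fun ret i => pvAInner l t i.toNat ret (i.toNat + 1)) PySem.Set.empty, p.1 ≤ p.2) ∧
     ((PySem.List.pyRange 0 (l.length : Int) 1).foldl
        (fun ret i => pvAInner l t i.toNat ret (i.toNat + 1)) PySem.Set.empty).Nodup ∧
     ∀ p, p ∈ (PySem.List.pyRange 0 (l.length : Int) 1).foldl
        (fun ret i => pvAInner l t i.toNat ret (i.toNat + 1)) PySem.Set.empty ↔ pvAProp l t p) := by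
  rw [PySem.List.pyRange_zero_natCast, List.foldl_map]
  have h := outer_char l t (List.range l.length) PySem.Set.empty (by simp [PySem.Set.empty]) (by simp [PySem.Set.empty])
  simp only [Int.toNat_natCast] at h ⊢
  obtain ⟨hs, hn, hm⟩ := h
  refine ⟨hs, hn, fun p => ?_⟩
  rw [hm p]
  simp only [PySem.Set.empty, List.not_mem_nil, false_or, List.mem_range, pvAProp]
  constructor
  · rintro ⟨i, _, k, h⟩; exact ⟨i, k, h⟩
  · rintro ⟨i, k, h1, h2, h3⟩; exact ⟨i, by omega, k, h1, h2, h3⟩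

lemma b_loop_char (t : Int) :
    ∀ (xs : List Int) (seen : PySem.Set Int) (pairs : PySem.Set (Int × Int)),
      (∀ p ∈ pairs, p.1 ≤ p.2) → pairs.Nodup →
      ((∀ q, q ∈ (xs.foldl (pvBStep t) (seen, pairs)).1 ↔ q ∈ seen ∨ q ∈ xs) ∧
       (∀ p ∈ (xs.foldl (pvBStep t) (seen, pairs)).2, p.1 ≤ p.2) ∧
       (xs.foldl (pvBStep t) (seen, pairs)).2.Nodup ∧
       ∀ p, p ∈ (xs.foldl (pvBStep t) (seen, pairs)).2 ↔ p ∈ pairs ∨ ∃ j, j < xs.length ∧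
         ((t - xs.getD j 0) ∈ seen ∨ ∃ i, i < j ∧ xs.getD i 0 = t - xs.getD j 0) ∧
         p = pvSpair (xs.getD j 0) (t - xs.getD j 0)) := by
  intro xs
  induction xs with
  | nil =>
    intro seen pairs hs hn
    refine ⟨fun q => by simp, hs, hn, fun p => ?_⟩
    simp
  | cons x xs ih =>
    intro seen pairs hs hn
    simp only [List.foldl_cons]
    have hstep : pvBStep t (seen, pairs) x =
        (PySem.Set.add seen x,
         if (t - x) ∈ seen then PySem.Set.add pairs (pvSpair x (t - x)) else pairs) := by
      simp [pvBStep]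
    rw [hstep]
    set pairs' := if (t - x) ∈ seen then PySem.Set.add pairs (pvSpair x (t - x)) else pairs with hp'
    have hmem' : ∀ p, p ∈ pairs' ↔ p ∈ pairs ∨ ((t - x) ∈ seen ∧ p = pvSpair x (t - x)) := by
      intro p; rw [hp']; split_ifs with h1
      · rw [PySem.Set.mem_add]; tauto
      · tauto
    have hs' : ∀ p ∈ pairs', p.1 ≤ p.2 := by
      intro p hp
      rcases (hmem' p).1 hp with h | ⟨_, rfl⟩
      · exact hs p h
      · exact pvSpair_le _ _
    have hn' : pairs'.Nodup := by
      rw [hp']; split_ifs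
      · exact PySem.Set.nodup_add _ _ hn
      · exact hn
    obtain ⟨ihseen, ihs, ihn, ihm⟩ := ih (PySem.Set.add seen x) pairs' hs' hn'
    refine ⟨fun q => ?_, ihs, ihn, fun p => ?_⟩
    · rw [ihseen q, PySem.Set.mem_add]; simp; tauto
    · rw [ihm p]
      constructor
      · rintro (h | ⟨j, hj, hc, hp⟩)
        · rcases (hmem' p).1 h with h' | ⟨h1, rfl⟩
          · exact Or.inl h'
          · exact Or.inr ⟨0, by simp, Or.inl (by simpa using h1), by simp⟩
        · refine Or.inr ⟨j + 1, by simpa using hj, ?_, by simpa using hp⟩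
          rcases hc with hc | ⟨i, hi, hv⟩
          · rw [PySem.Set.mem_add] at hc
            rcases hc with hc | hc
            · exact Or.inl (by simpa using hc)
            · exact Or.inr ⟨0, by omega, by simpa using hc.symm⟩
          · exact Or.inr ⟨i + 1, by omega, by simpa using hv⟩
      · rintro (h | ⟨j, hj, hc, hp⟩)
        · exact Or.inl ((hmem' p).2 (Or.inl h))
        · match j with
          | 0 =>
            rcases hc with hc | ⟨i, hi, _⟩
            · exact Or.inl ((hmem' p).2 (Or.inr ⟨by simpa using hc, by simpa using hp⟩))
            · omega
          | j' + 1 =>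
            simp only [List.getD_cons_succ] at hc hp
            refine Or.inr ⟨j', by simpa using hj, ?_, hp⟩
            rcases hc with hc | ⟨i, hi, hv⟩
            · exact Or.inl (by rw [PySem.Set.mem_add]; exact Or.inl hc)
            · match i with
              | 0 =>
                simp only [List.getD_cons_zero] at hv
                exact Or.inl (by rw [PySem.Set.mem_add]; exact Or.inr hv.symm)
              | i' + 1 =>
                simp only [List.getD_cons_succ] at hv
                exact Or.inr ⟨i', by omega, hv⟩

lemma b_set_char (l : List Int) (t : Int) :
    ((l.foldl (pvBStep t) (PySem.Set.empty, PySem.Set.empty)).2.Nodup ∧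
     ∀ p, p ∈ (l.foldl (pvBStep t) (PySem.Set.empty, PySem.Set.empty)).2 ↔ pvAProp l t p) := by
  obtain ⟨_, _, hn, hm⟩ := b_loop_char t l PySem.Set.empty PySem.Set.empty
    (by simp [PySem.Set.empty]) (by simp [PySem.Set.empty])
  refine ⟨hn, fun p => ?_⟩
  rw [hm p]
  simp only [PySem.Set.empty, List.not_mem_nil, false_or, pvAProp]
  constructor
  · rintro ⟨j, hj, ⟨i, hi, hv⟩, hp⟩
    refine ⟨i, j, hi, hj, by omega, ?_⟩
    rw [hp, hv]
    exact pvSpair_comm _ _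
  · rintro ⟨i, k, hik, hk, hsum, hp⟩
    refine ⟨k, hk, ⟨i, hik, by omega⟩, ?_⟩
    rw [hp, pvSpair_comm]
    congr 1; omega

lemma sets_length_eq (l : List Int) (t : Int) :
    ((PySem.List.pyRange 0 (l.length : Int) 1).foldl
        (fun ret i => pvAInner l t i.toNat ret (i.toNat + 1)) PySem.Set.empty).length =
    ((l.foldl (pvBStep t) (PySem.Set.empty, PySem.Set.empty)).2).length := by
  obtain ⟨_, hna, hma⟩ := a_set_char l t
  obtain ⟨hnb, hmb⟩ := b_set_char l t
  exact ((List.perm_ext_iff_of_nodup hna hnb).mpr (fun p => by rw [hma p, hmb p])).length_eq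


-- ===== VERDICT (by name: the statement is the Claim_ definition above) =====
theorem my_pair_sum_spec : Claim_equal_my_pair_sum := by
  intro list target _
  unfold Spec_my_pair_sum my_pair_sum my_pair_sum_alt
  split_ifs with h
  · rfl
  · exact congrArg (fun n : Nat => (some (n : Int) : Option Int)) (sets_length_eq list target)
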